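-- pv_equiv track=rewrite | github.com/Roberia-yagi/template_reconstruction | Old/experiment_with_features/step1/step1.py | compress_labels
-- ===== SOURCE A (Python) =====
-- from typing import Any, Union, Tuple, Dict, List
--
-- def compress_labels(labels: List[int]) -> Dict[int, int]:
--     label_map = {}
--
--     index = 0
--     for label in labels:
--         if label not in label_map:
--             label_map[label] = index
--             index += 1
--
--     return label_map
-- ===== SOURCE B (Python) =====
-- def compress_labels(labels):
--     # Stage 1: scan the enumeration in reverse so the earliest position written last
--     # wins: first_pos[label] = index of the label's first occurrence.
--     first_pos = {label: pos for pos, label in reversed(list(enumerate(labels)))}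
--     # Stage 2: sort the distinct labels by first-occurrence position.
--     ordered = sorted(first_pos, key=first_pos.get)
--     # Stage 3: rank them.
--     return {label: rank for rank, label in enumerate(ordered)}
-- ===== Notes on version B (the rewrite author's own statement) =====
-- stated objective: alternative
-- what changed: Replaces A's single-pass counter-with-membership-guard loop by a three-stage sort-based algorithm: a reverse scan records each label's first-occurrence position with no guard (later writes overwrite), the distinct labels are then sorted by that position, and ranks are assigned by enumeration.
import Mathlib
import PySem

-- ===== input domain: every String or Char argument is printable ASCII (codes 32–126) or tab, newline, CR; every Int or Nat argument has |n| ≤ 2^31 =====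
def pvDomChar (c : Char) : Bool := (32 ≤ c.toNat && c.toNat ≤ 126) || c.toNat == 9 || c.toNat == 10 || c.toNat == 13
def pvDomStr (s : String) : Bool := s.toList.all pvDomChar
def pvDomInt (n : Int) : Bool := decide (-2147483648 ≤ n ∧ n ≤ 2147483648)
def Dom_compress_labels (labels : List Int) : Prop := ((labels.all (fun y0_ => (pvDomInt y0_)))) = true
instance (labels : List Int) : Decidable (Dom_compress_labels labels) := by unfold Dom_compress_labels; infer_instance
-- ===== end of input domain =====

-- B replaces A's counter-with-guard loop by a sort-based staged algorithm: a reverse scan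
-- records first-occurrence positions, the labels are sorted by that position, then ranked
-- (alternative algorithm; return value only, no side effects involved).

-- ===== PORT A =====
-- the loop body: 'if label not in label_map: label_map[label] = index; index += 1'
def compress_labels_step (st : PySem.Dict Int Int × Int) (label : Int) : PySem.Dict Int Int × Int :=
  if st.1.contains label then st else (st.1.insert label st.2, st.2 + 1)

def compress_labels (labels : List Int) : List (Int × Int) :=
  (labels.foldl compress_labels_step (PySem.Dict.empty, 0)).1.items

-- ===== PORT B =====
-- {label: pos for pos, label in reversed(list(enumerate(labels)))}: later (earlier-position)
-- writes overwrite, so each label maps to its first-occurrence position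
def compress_labels_firstpos (labels : List Int) : PySem.Dict Int Int :=
  ((PySem.List.enumerate labels 0).reverse).foldl (fun d p => d.insert p.2 p.1) PySem.Dict.empty

-- sorted(first_pos, key=first_pos.get), then {label: rank for rank, label in enumerate(ordered)}
-- (keys are distinct, so the dict comprehension's items are the swapped enumerate pairs)
def compress_labels_alt (labels : List Int) : List (Int × Int) :=
  let fp := compress_labels_firstpos labels
  let ordered := PySem.List.sorted fp.keys (fun k => fp.getD k 0)
  (PySem.List.enumerate ordered 0).map (fun p => (p.2, p.1))

-- ===== PRECONDITION & SPEC =====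
def Spec_compress_labels (labels : List Int) (out : List (Int × Int)) : Prop := out = compress_labels_alt labels
instance (labels : List Int) (out : List (Int × Int)) : Decidable (Spec_compress_labels labels out) := by unfold Spec_compress_labels; infer_instance

-- ===== CLAIM (what is proved, stated in full; the proofs are below) =====
def Claim_equal_compress_labels : Prop := ∀ (labels : List Int), Dom_compress_labels labels → Spec_compress_labels labels (compress_labels labels)

-- ===== LEMMAS AND PROOFS =====

-- A-side loop invariant: after processing distinct-so-far list u, the dict holds the swapped
-- enumeration of u and the counter is u.length
theorem compress_labels_loop (l u : List Int) :
    l.foldl compress_labels_step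
      (PySem.Dict.mk ((PySem.List.enumerate u 0).map (fun p => (p.2, p.1))), (u.length : Int))
    = (PySem.Dict.mk ((PySem.List.enumerate (PySem.Set.update u l) 0).map (fun p => (p.2, p.1))),
       ((PySem.Set.update u l).length : Int)) := by
  induction l generalizing u with
  | nil => simp [PySem.Set.update]
  | cons x xs ih =>
    have hkeys : (PySem.Dict.mk ((PySem.List.enumerate u 0).map (fun p => (p.2, p.1)))).keys = u := by
      simp [PySem.Dict.keys_mk, List.map_map, Function.comp_def, PySem.List.map_snd_enumerate]
    by_cases hx : x ∈ u
    · have hc : (PySem.Dict.mk ((PySem.List.enumerate u 0).map (fun p => (p.2, p.1)))).contains x = true := by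
        rw [PySem.Dict.contains_iff_mem_keys, hkeys]; exact hx
      have hadd : PySem.Set.add u x = u := by simp [PySem.Set.add, PySem.Set.contains, hx]
      simp only [List.foldl_cons, compress_labels_step, hc, if_true]
      rw [show (PySem.Set.update u (x :: xs)) = PySem.Set.update (PySem.Set.add u x) xs from rfl, hadd]
      exact ih u
    · have hc : (PySem.Dict.mk ((PySem.List.enumerate u 0).map (fun p => (p.2, p.1)))).contains x = false := by
        rw [Bool.eq_false_iff, Ne, PySem.Dict.contains_iff_mem_keys, hkeys]; exact hx
      have hadd : PySem.Set.add u x = u ++ [x] := by simp [PySem.Set.add, PySem.Set.contains, hx]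
      simp only [List.foldl_cons, compress_labels_step, hc, Bool.false_eq_true, if_false]
      have hins : (PySem.Dict.mk ((PySem.List.enumerate u 0).map (fun p => (p.2, p.1)))).insert x (u.length : Int)
          = PySem.Dict.mk ((PySem.List.enumerate (u ++ [x]) 0).map (fun p => (p.2, p.1))) := by
        apply PySem.Dict.ext
        rw [PySem.Dict.items_insert, hc]
        simp [PySem.List.enumerate_append, PySem.List.enumerate_cons]
      rw [show (PySem.Set.update u (x :: xs)) = PySem.Set.update (PySem.Set.add u x) xs from rfl, hadd]
      have := ih (u ++ [x])
      simp only [List.length_append, List.length_singleton] at this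
      push_cast at this
      rw [hins]
      exact this

-- A's result is the swapped enumeration of the ordered distinct labels
theorem compress_labels_eq_enum_dedup (labels : List Int) :
    compress_labels labels
      = (PySem.List.enumerate (PySem.List.dedup labels) 0).map (fun p => (p.2, p.1)) := by
  unfold compress_labels
  rw [show ((PySem.Dict.empty : PySem.Dict Int Int), (0 : Int)) =
      (PySem.Dict.mk ((PySem.List.enumerate ([] : List Int) 0).map (fun p => (p.2, p.1))),
       ((List.length ([] : List Int) : Int))) from rfl,
    compress_labels_loop]
  have : PySem.Set.update ([] : List Int) labels = PySem.List.dedup labels := by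
    simp [PySem.Set.update, PySem.List.dedup_eq_ofList, PySem.Set.ofList_eq_foldl]
  simp [this]

-- B stage 1: the reverse-scan dict maps each label to its first-occurrence position
theorem firstpos_get (l : List Int) (s y : Int) :
    (((PySem.List.enumerate l s).reverse).foldl (fun d p => d.insert p.2 p.1)
        (PySem.Dict.empty : PySem.Dict Int Int)).get? y
      = if y ∈ l then some (s + (l.idxOf y : Int)) else none := by
  induction l generalizing s with
  | nil => simp [PySem.List.enumerate_nil, PySem.Dict.get?_empty]
  | cons x xs ih =>
    rw [PySem.List.enumerate_cons, List.reverse_cons, List.foldl_append]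
    simp only [List.foldl_cons, List.foldl_nil]
    rw [PySem.Dict.get?_insert]
    by_cases hyx : y = x
    · subst hyx; simp [List.idxOf_cons_self]
    · rw [if_neg hyx, ih (s + 1)]
      by_cases hm : y ∈ xs
      · rw [if_pos hm, if_pos (List.mem_cons_of_mem x hm),
          List.idxOf_cons_ne xs (fun h => hyx h.symm)]
        push_cast; ring_nf
      · rw [if_neg hm, if_neg (by simp [hyx, hm])]

theorem firstpos_keys (labels : List Int) :
    (compress_labels_firstpos labels).keys = PySem.Set.ofList labels.reverse := by
  unfold compress_labels_firstpos
  rw [PySem.Dict.keys_foldl_insert_key ((PySem.List.enumerate labels 0).reverse)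
        (fun p => p.2) (fun _ p => p.1)]
  rw [show ((PySem.List.enumerate labels 0).reverse).map (fun p => p.2)
        = labels.reverse by rw [List.map_reverse]; simp [PySem.List.map_snd_enumerate]]
  simp [PySem.Dict.keys_empty, PySem.Set.update_nil_left]

-- dedup lists labels in strictly increasing first-occurrence order
theorem dedup_pairwise_idxOf (l : List Int) :
    (PySem.List.dedup l).Pairwise (fun a b => l.idxOf a < l.idxOf b) := by
  induction l with
  | nil => simp [PySem.List.dedup_eq_ofList, PySem.Set.ofList_nil]
  | cons x xs ih =>
    rw [PySem.List.dedup_eq_ofList, PySem.Set.ofList_cons]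
    constructor
    · intro b hb
      have hb' := (PySem.Set.mem_discard _ _ _).1 hb
      rw [List.idxOf_cons_self, List.idxOf_cons_ne xs (fun h => hb'.2 h.symm)]
      omega
    · have hsub : (PySem.Set.discard (PySem.Set.ofList xs) x).Sublist (PySem.Set.ofList xs) := by
        simp [PySem.Set.discard]
      have hpw := List.Pairwise.sublist hsub (by rw [PySem.List.dedup_eq_ofList] at ih; exact ih)
      refine hpw.imp_of_mem ?_
      intro a b ha hb hab
      have hax := ((PySem.Set.mem_discard _ _ _).1 ha).2
      have hbx := ((PySem.Set.mem_discard _ _ _).1 hb).2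
      rw [List.idxOf_cons_ne xs (fun h => hax h.symm),
          List.idxOf_cons_ne xs (fun h => hbx h.symm)]
      omega

-- the sort stage reproduces the first-appearance order of the distinct labels
theorem sorted_firstpos_eq_dedup (labels : List Int) :
    PySem.List.sorted (compress_labels_firstpos labels).keys
        (fun k => (compress_labels_firstpos labels).getD k 0)
      = PySem.List.dedup labels := by
  apply PySem.List.sorted_eq_of_perm_of_pairwise_lt
  · rw [List.perm_ext_iff_of_nodup (by rw [PySem.List.dedup_eq_ofList]; exact PySem.Set.nodup_ofList _)
          (by rw [firstpos_keys]; exact PySem.Set.nodup_ofList _)]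
    intro a
    rw [PySem.List.mem_dedup _ _, firstpos_keys, PySem.Set.mem_ofList, List.mem_reverse]
  · refine (dedup_pairwise_idxOf labels).imp_of_mem ?_
    intro a b ha hb hab
    have hma : a ∈ labels := (PySem.List.mem_dedup _ _).1 ha
    have hmb : b ∈ labels := (PySem.List.mem_dedup _ _).1 hb
    have hga : (compress_labels_firstpos labels).getD a 0 = (labels.idxOf a : Int) := by
      rw [PySem.Dict.getD_eq_get?_getD]
      unfold compress_labels_firstpos
      rw [firstpos_get labels 0 a, if_pos hma]; simp
    have hgb : (compress_labels_firstpos labels).getD b 0 = (labels.idxOf b : Int) := by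
      rw [PySem.Dict.getD_eq_get?_getD]
      unfold compress_labels_firstpos
      rw [firstpos_get labels 0 b, if_pos hmb]; simp
    simp only [hga, hgb]
    exact_mod_cast hab

-- ===== VERDICT (by name: the statement is the Claim_ definition above) =====
theorem compress_labels_spec : Claim_equal_compress_labels := by
  intro labels _
  unfold Spec_compress_labels
  rw [compress_labels_eq_enum_dedup]
  show _ = (PySem.List.enumerate
      (PySem.List.sorted (compress_labels_firstpos labels).keys
        (fun k => (compress_labels_firstpos labels).getD k 0)) 0).map (fun p => (p.2, p.1))
  rw [sorted_firstpos_eq_dedup]
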